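-- pv_equiv track=rewrite | github.com/chriskagenda/TRANSLATOR | lunyoro-translator/backend/language_rules.py | apply_rl_rule
-- ===== SOURCE A (Python) =====
-- def apply_rl_rule(text: str) -> str:
--     """Replace L with R except when adjacent to e or i."""
--     if not text:
--         return text
--     chars = list(text)
--     result = []
--     for i, ch in enumerate(chars):
--         if ch not in ('l', 'L'):
--             result.append(ch)
--             continue
--         prev = chars[i - 1].lower() if i > 0 else ''
--         nxt  = chars[i + 1].lower() if i < len(chars) - 1 else ''
--         if prev in ('e', 'i') or nxt in ('e', 'i'):
--             result.append(ch)
--         else: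
--             result.append('R' if ch.isupper() else 'r')
--     return ''.join(result)
-- ===== SOURCE B (Python) =====
-- def apply_rl_rule(text: str) -> str:
--     """Replace L with R except when adjacent to e or i."""
--     protected = set()
--     for j, ch in enumerate(text):
--         if ch in 'eiEI':
--             protected.add(j - 1)
--             protected.add(j + 1)
--     return ''.join(
--         ('R' if ch == 'L' else 'r') if ch in 'lL' and i not in protected else ch
--         for i, ch in enumerate(text)
--     )
-- ===== Notes on version B (the rewrite author's own statement) =====
-- stated objective: alternative
-- what changed: Instead of A's per-l neighbour interrogation (chars[i-1]/chars[i+1] lowered and tested at each l), B inverts the indexing: a first pass over the vowels e/i/E/I builds a set of shielded positions (each vowel shields j-1 and j+1), and a second context-free pass replaces every l/L whose own index is not in that set.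
import Mathlib
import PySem

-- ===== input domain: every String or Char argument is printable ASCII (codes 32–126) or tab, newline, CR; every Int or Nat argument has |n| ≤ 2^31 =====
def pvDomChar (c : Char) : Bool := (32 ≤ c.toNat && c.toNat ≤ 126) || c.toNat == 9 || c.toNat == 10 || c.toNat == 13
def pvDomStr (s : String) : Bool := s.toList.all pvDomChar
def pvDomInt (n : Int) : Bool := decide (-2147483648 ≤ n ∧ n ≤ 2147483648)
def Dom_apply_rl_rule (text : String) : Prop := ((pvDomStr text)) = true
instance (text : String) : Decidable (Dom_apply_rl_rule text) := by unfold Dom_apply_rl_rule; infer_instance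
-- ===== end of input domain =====

-- B inverts A's indexing: instead of reading each l's neighbours, it first marks the positions
-- shielded by a vowel e/i/E/I (a set of indices) and then replaces the unshielded l/L; objective:
-- alternative (same cost, different traversal).

-- ===== PORT A =====
-- literal transliteration of A: empty guard, enumerate loop, chars[i-1]/chars[i+1] via pyGet?
def apply_rl_rule (text : String) : String :=
  if text = "" then text
  else
    let chars := text.toList
    let result := (PySem.List.enumerate chars).foldl
      (fun acc (p : Int × Char) =>
        let i := p.1
        let ch := p.2
        if ¬(ch = 'l' ∨ ch = 'L') then acc ++ [ch]
        else
          let prev : Option Char :=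
            if 0 < i then (PySem.List.pyGet? chars (i - 1)).map PySem.Chars.lowerChar else none
          let nxt : Option Char :=
            if i < (chars.length : Int) - 1 then (PySem.List.pyGet? chars (i + 1)).map PySem.Chars.lowerChar else none
          if (prev = some 'e' ∨ prev = some 'i') ∨ (nxt = some 'e' ∨ nxt = some 'i') then acc ++ [ch]
          else acc ++ [if PySem.Chars.isupper ch then 'R' else 'r']) []
    String.ofList result

-- ===== PORT B =====
-- transliteration of B: first pass marks j-1 and j+1 of every vowel in a set, second pass
-- replaces each l/L whose index is not in the set
def apply_rl_rule_alt (text : String) : String :=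
  let cs := text.toList
  let protected_ : PySem.Set Int := (PySem.List.enumerate cs).foldl
    (fun s p => if p.2 = 'e' ∨ p.2 = 'i' ∨ p.2 = 'E' ∨ p.2 = 'I'
                then PySem.Set.add (PySem.Set.add s (p.1 - 1)) (p.1 + 1) else s)
    PySem.Set.empty
  String.ofList ((PySem.List.enumerate cs).map (fun p =>
    if (p.2 = 'l' ∨ p.2 = 'L') ∧ p.1 ∉ protected_ then (if p.2 = 'L' then 'R' else 'r') else p.2))

-- ===== PRECONDITION & SPEC =====
def Spec_apply_rl_rule (text : String) (out : String) : Prop := out = apply_rl_rule_alt text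
instance (text : String) (out : String) : Decidable (Spec_apply_rl_rule text out) := by unfold Spec_apply_rl_rule; infer_instance

-- ===== CLAIM (what is proved, stated in full; the proofs are below) =====
def Claim_equal_apply_rl_rule : Prop := ∀ (text : String), Dom_apply_rl_rule text → Spec_apply_rl_rule text (apply_rl_rule text)

-- ===== LEMMAS AND PROOFS =====

-- A's per-index output value
def pvG (chars : List Char) (p : Int × Char) : Char :=
  if ¬(p.2 = 'l' ∨ p.2 = 'L') then p.2
  else
    let prev : Option Char := if 0 < p.1 then (PySem.List.pyGet? chars (p.1 - 1)).map PySem.Chars.lowerChar else none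
    let nxt : Option Char := if p.1 < (chars.length : Int) - 1 then (PySem.List.pyGet? chars (p.1 + 1)).map PySem.Chars.lowerChar else none
    if (prev = some 'e' ∨ prev = some 'i') ∨ (nxt = some 'e' ∨ nxt = some 'i') then p.2
    else if PySem.Chars.isupper p.2 then 'R' else 'r'

-- B's protected set, and B's per-index output value
def pvProt (cs : List Char) : PySem.Set Int :=
  (PySem.List.enumerate cs).foldl
    (fun s p => if p.2 = 'e' ∨ p.2 = 'i' ∨ p.2 = 'E' ∨ p.2 = 'I'
                then PySem.Set.add (PySem.Set.add s (p.1 - 1)) (p.1 + 1) else s)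
    PySem.Set.empty

def pvB (cs : List Char) (p : Int × Char) : Char :=
  if (p.2 = 'l' ∨ p.2 = 'L') ∧ p.1 ∉ pvProt cs then (if p.2 = 'L' then 'R' else 'r') else p.2

theorem alt_eq (text : String) :
    apply_rl_rule_alt text = String.ofList ((PySem.List.enumerate text.toList).map (pvB text.toList)) := rfl

theorem char_eq_iff_toNat (c d : Char) : c = d ↔ c.toNat = d.toNat := by
  constructor
  · intro h; rw [h]
  · intro h; exact Char.ext (by exact UInt32.toNat_inj.mp h)

-- lowering hits e/i exactly on the four vowels B tests
theorem lower_ei (c : Char) :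
    (PySem.Chars.lowerChar c = 'e' ∨ PySem.Chars.lowerChar c = 'i') ↔
    (c = 'e' ∨ c = 'i' ∨ c = 'E' ∨ c = 'I') := by
  unfold PySem.Chars.lowerChar PySem.Chars.isupper
  have hA : ('A' ≤ c) ↔ 65 ≤ c.toNat := by constructor <;> (intro h; exact_mod_cast h)
  have hZ : (c ≤ 'Z') ↔ c.toNat ≤ 90 := by constructor <;> (intro h; exact_mod_cast h)
  split_ifs with h
  · simp only [Bool.and_eq_true, decide_eq_true_eq] at h
    have hb : 65 ≤ c.toNat ∧ c.toNat ≤ 90 := ⟨hA.mp h.1, hZ.mp h.2⟩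
    have hv : Nat.isValidChar (c.toNat + 32) := by unfold Nat.isValidChar; omega
    have ht : (Char.ofNat (c.toNat + 32)).toNat = c.toNat + 32 := by
      rw [Char.toNat_ofNat]; simp [hv]
    rw [char_eq_iff_toNat _ 'e', char_eq_iff_toNat _ 'i', ht,
        char_eq_iff_toNat c 'e', char_eq_iff_toNat c 'i', char_eq_iff_toNat c 'E', char_eq_iff_toNat c 'I']
    show (c.toNat + 32 = 101 ∨ c.toNat + 32 = 105) ↔ (c.toNat = 101 ∨ c.toNat = 105 ∨ c.toNat = 69 ∨ c.toNat = 73)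
    omega
  · simp only [Bool.and_eq_true, decide_eq_true_eq, not_and_or, hA, hZ] at h
    rw [char_eq_iff_toNat c 'E', char_eq_iff_toNat c 'I']
    show (c = 'e' ∨ c = 'i') ↔ (c = 'e' ∨ c = 'i' ∨ c.toNat = 69 ∨ c.toNat = 73)
    rw [char_eq_iff_toNat c 'e', char_eq_iff_toNat c 'i']
    show (c.toNat = 101 ∨ c.toNat = 105) ↔ (c.toNat = 101 ∨ c.toNat = 105 ∨ c.toNat = 69 ∨ c.toNat = 73)
    omega

-- membership in the set built by B's first loop
theorem mem_protFold (l : List (Int × Char)) (s : PySem.Set Int) (x : Int) :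
    x ∈ l.foldl
      (fun s p => if p.2 = 'e' ∨ p.2 = 'i' ∨ p.2 = 'E' ∨ p.2 = 'I'
                  then PySem.Set.add (PySem.Set.add s (p.1 - 1)) (p.1 + 1) else s) s
    ↔ x ∈ s ∨ ∃ p ∈ l, (p.2 = 'e' ∨ p.2 = 'i' ∨ p.2 = 'E' ∨ p.2 = 'I') ∧ (x = p.1 - 1 ∨ x = p.1 + 1) := by
  induction l generalizing s with
  | nil => simp
  | cons a t ih =>
    simp only [List.foldl_cons]
    rw [ih]
    by_cases hv : a.2 = 'e' ∨ a.2 = 'i' ∨ a.2 = 'E' ∨ a.2 = 'I'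
    · rw [if_pos hv]
      simp only [PySem.Set.mem_add, List.mem_cons]
      constructor
      · rintro (((h | h) | h) | ⟨p, hp, hvp, hx⟩)
        · exact Or.inl h
        · exact Or.inr ⟨a, Or.inl rfl, hv, Or.inl h⟩
        · exact Or.inr ⟨a, Or.inl rfl, hv, Or.inr h⟩
        · exact Or.inr ⟨p, Or.inr hp, hvp, hx⟩
      · rintro (h | ⟨p, (rfl | hp), hvp, hx⟩)
        · exact Or.inl (Or.inl (Or.inl h))
        · rcases hx with h | h
          · exact Or.inl (Or.inl (Or.inr h))
          · exact Or.inl (Or.inr h)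
        · exact Or.inr ⟨p, hp, hvp, hx⟩
    · rw [if_neg hv]
      simp only [List.mem_cons]
      constructor
      · rintro (h | ⟨p, hp, hvp, hx⟩)
        · exact Or.inl h
        · exact Or.inr ⟨p, Or.inr hp, hvp, hx⟩
      · rintro (h | ⟨p, (rfl | hp), hvp, hx⟩)
        · exact Or.inl h
        · exact absurd hvp hv
        · exact Or.inr ⟨p, hp, hvp, hx⟩

-- membership characterisation at an index k
theorem mem_prot (cs : List Char) (k : Nat) (hk : k < cs.length) :
    ((k : Int) ∈ pvProt cs) ↔
    ((∃ _ : 0 < k, (cs[k-1]'(by omega) = 'e' ∨ cs[k-1]'(by omega) = 'i' ∨ cs[k-1]'(by omega) = 'E' ∨ cs[k-1]'(by omega) = 'I')) ∨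
     (∃ h1 : k + 1 < cs.length, (cs[k+1]'h1 = 'e' ∨ cs[k+1]'h1 = 'i' ∨ cs[k+1]'h1 = 'E' ∨ cs[k+1]'h1 = 'I'))) := by
  unfold pvProt
  rw [mem_protFold]
  constructor
  · rintro (h | ⟨p, hp, hvp, hx⟩)
    · exact absurd h (List.not_mem_nil)
    · rw [PySem.List.mem_enumerate_iff] at hp
      obtain ⟨j, hj, rfl⟩ := hp
      simp only [zero_add] at hvp hx ⊢
      rcases hx with h | h
      · -- k = j - 1, so j = k + 1
        have hj' : j = k + 1 := by omega
        subst hj'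
        exact Or.inr ⟨hj, hvp⟩
      · -- k = j + 1, so j = k - 1 and 0 < k
        have hk0 : 0 < k := by omega
        have hj' : j = k - 1 := by omega
        subst hj'
        exact Or.inl ⟨hk0, hvp⟩
  · rintro (⟨h0, hv⟩ | ⟨h1, hv⟩)
    · refine Or.inr ⟨((k - 1 : Nat), cs[k-1]'(by omega)), ?_, hv, Or.inr (by push_cast; omega)⟩
      rw [PySem.List.mem_enumerate_iff]
      exact ⟨k - 1, by omega, by simp⟩
    · refine Or.inr ⟨((k + 1 : Nat), cs[k+1]'(by omega)), ?_, hv, Or.inl (by push_cast; omega)⟩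
      rw [PySem.List.mem_enumerate_iff]
      exact ⟨k + 1, by omega, by simp⟩

-- pointwise: A's value at index k equals B's value at index k
theorem point_eq (cs : List Char) (k : Nat) (hk : k < cs.length) :
    pvG cs ((k : Int), cs[k]) = pvB cs ((k : Int), cs[k]) := by
  by_cases hl : cs[k] = 'l' ∨ cs[k] = 'L'
  · have e1 : (if 0 < ((k : Int)) then (PySem.List.pyGet? cs ((k : Int) - 1)).map PySem.Chars.lowerChar else none)
        = (if h0 : 0 < k then some (PySem.Chars.lowerChar (cs[k-1]'(by omega))) else none) := by
      by_cases h0 : 0 < k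
      · rw [if_pos (by exact_mod_cast h0), dif_pos h0]
        have hc : ((k : Int) - 1) = ((k - 1 : Nat) : Int) := by omega
        rw [hc, PySem.List.pyGet?_natCast, List.getElem?_eq_getElem (by omega), Option.map_some]
      · rw [if_neg (by omega), dif_neg h0]
    have e2 : (if ((k : Int)) < (cs.length : Int) - 1 then (PySem.List.pyGet? cs ((k : Int) + 1)).map PySem.Chars.lowerChar else none)
        = (if h1 : k + 1 < cs.length then some (PySem.Chars.lowerChar (cs[k+1]'(by omega))) else none) := by
      by_cases h1 : k + 1 < cs.length
      · rw [if_pos (by omega), dif_pos h1]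
        have hc : ((k : Int) + 1) = ((k + 1 : Nat) : Int) := by omega
        rw [hc, PySem.List.pyGet?_natCast, List.getElem?_eq_getElem (by omega), Option.map_some]
      · rw [if_neg (by omega), dif_neg h1]
    -- A's adjacency condition equals membership in B's protected set
    have hcond :
        (((if 0 < ((k : Int)) then (PySem.List.pyGet? cs ((k : Int) - 1)).map PySem.Chars.lowerChar else none) = some 'e' ∨
          (if 0 < ((k : Int)) then (PySem.List.pyGet? cs ((k : Int) - 1)).map PySem.Chars.lowerChar else none) = some 'i') ∨
         ((if ((k : Int)) < (cs.length : Int) - 1 then (PySem.List.pyGet? cs ((k : Int) + 1)).map PySem.Chars.lowerChar else none) = some 'e' ∨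
          (if ((k : Int)) < (cs.length : Int) - 1 then (PySem.List.pyGet? cs ((k : Int) + 1)).map PySem.Chars.lowerChar else none) = some 'i'))
        ↔ ((k : Int) ∈ pvProt cs) := by
      rw [e1, e2, mem_prot cs k hk]
      by_cases h0 : 0 < k <;> by_cases h1 : k + 1 < cs.length <;>
        simp [h0, h1, ← lower_ei]
    unfold pvG pvB
    rw [if_neg (not_not_intro hl)]
    by_cases hc : (k : Int) ∈ pvProt cs
    · rw [if_pos (hcond.mpr hc), if_neg (by tauto)]
    · rw [if_neg (fun h => hc (hcond.mp h)),
          if_pos (show (((k : Int), cs[k]).2 = 'l' ∨ ((k : Int), cs[k]).2 = 'L') ∧ ((k : Int), cs[k]).1 ∉ pvProt cs from ⟨hl, hc⟩)]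
      rcases hl with h | h <;> rw [h] <;> rfl
  · unfold pvG pvB
    rw [if_pos hl, if_neg (by tauto)]

-- the mapped lists coincide
theorem lists_eq (cs : List Char) :
    (PySem.List.enumerate cs).map (pvG cs) = (PySem.List.enumerate cs).map (pvB cs) := by
  apply List.ext_getElem
  · simp
  · intro k h1 h2
    have hk : k < cs.length := by
      simpa [PySem.List.length_enumerate] using h1
    rw [List.getElem_map, List.getElem_map, PySem.List.getElem_enumerate]
    have hz : 0 + (k : Int) = (k : Int) := by ring
    rw [hz]
    exact point_eq cs k hk

-- ===== VERDICT (by name: the statement is the Claim_ definition above) =====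
theorem apply_rl_rule_spec : Claim_equal_apply_rl_rule := by
  intro text _
  unfold Spec_apply_rl_rule
  rw [alt_eq]
  unfold apply_rl_rule
  by_cases he : text = ""
  · subst he
    rfl
  · rw [if_neg he]
    have hbody :
        (fun acc (p : Int × Char) =>
          if ¬(p.2 = 'l' ∨ p.2 = 'L') then acc ++ [p.2]
          else
            let prev : Option Char :=
              if 0 < p.1 then (PySem.List.pyGet? text.toList (p.1 - 1)).map PySem.Chars.lowerChar else none
            let nxt : Option Char :=
              if p.1 < (text.toList.length : Int) - 1 then (PySem.List.pyGet? text.toList (p.1 + 1)).map PySem.Chars.lowerChar else none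
            if (prev = some 'e' ∨ prev = some 'i') ∨ (nxt = some 'e' ∨ nxt = some 'i') then acc ++ [p.2]
            else acc ++ [if PySem.Chars.isupper p.2 then 'R' else 'r'])
        = (fun acc p => acc ++ [pvG text.toList p]) := by
      funext acc p
      simp only [pvG]
      split_ifs <;> rfl
    simp only [hbody, PySem.List.foldl_append_singleton_eq_map, List.nil_append]
    rw [lists_eq]
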